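-- pv_equiv track=rewrite | github.com/jiali1025/Computational-intelligence-for-soft-strain-sensor-sustainability | hysteresis_gru_seed1.py | train_dev_data
-- ===== SOURCE A (Python) =====
-- def train_dev_data(dataset):
--     train_items, dev_items = [], []
--     for i in range(len(dataset)):
--         if i % 10 != 0:
--             train_items.append(dataset[i])
--         else:
--             dev_items.append(dataset[i])
--     return train_items, dev_items
-- ===== SOURCE B (Python) =====
-- def train_dev_data(dataset):
--     dev_items = list(dataset[::10])
--     train_items = [x for i, x in enumerate(dataset) if i % 10 != 0]
--     return train_items, dev_items
-- ===== Notes on version B (the rewrite author's own statement) =====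
-- stated objective: idiomatic
-- what changed: Replaces the single interleaved index loop with two differently-shaped passes: dev_items comes from the stride slice dataset[::10] and train_items from an enumerate-based comprehension filtering indices not divisible by 10.
import Mathlib
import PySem

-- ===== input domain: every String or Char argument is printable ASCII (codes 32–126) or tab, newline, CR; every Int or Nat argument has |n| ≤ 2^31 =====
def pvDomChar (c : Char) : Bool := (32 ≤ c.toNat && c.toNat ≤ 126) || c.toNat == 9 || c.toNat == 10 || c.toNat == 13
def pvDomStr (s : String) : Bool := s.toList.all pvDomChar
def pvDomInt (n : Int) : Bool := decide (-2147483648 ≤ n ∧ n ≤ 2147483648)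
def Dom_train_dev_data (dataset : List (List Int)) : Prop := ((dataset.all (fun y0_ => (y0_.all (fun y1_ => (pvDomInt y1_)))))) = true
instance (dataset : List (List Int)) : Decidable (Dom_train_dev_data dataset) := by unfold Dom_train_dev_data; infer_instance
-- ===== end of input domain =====

-- B replaces A's single interleaved index loop with two passes: a stride slice
-- dataset[::10] for dev_items and an enumerate comprehension for train_items (idiomatic).

-- ===== PORT A =====
-- for i in range(len(dataset)): append dataset[i] to train or dev depending on i % 10
def train_dev_data (dataset : List (List Int)) : List (List Int) × List (List Int) :=
  (PySem.List.pyRange 0 (dataset.length : Int) 1).foldl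
    (fun (acc : List (List Int) × List (List Int)) i =>
      if i % 10 != 0 then (acc.1 ++ [PySem.List.pyGetD dataset i []], acc.2)
      else (acc.1, acc.2 ++ [PySem.List.pyGetD dataset i []]))
    ([], [])

-- ===== PORT B =====
-- dev_items = list(dataset[::10]); step 10 ≠ 0 so slice? always returns some (getD [] is never taken)
-- train_items = [x for i, x in enumerate(dataset) if i % 10 != 0]
def train_dev_data_alt (dataset : List (List Int)) : List (List Int) × List (List Int) :=
  let dev_items := (PySem.List.slice? dataset none none 10).getD []
  let train_items := ((PySem.List.enumerate dataset 0).filter (fun p => p.1 % 10 != 0)).map (·.2)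
  (train_items, dev_items)

-- ===== PRECONDITION & SPEC =====
def Spec_train_dev_data (dataset : List (List Int)) (out : List (List Int) × List (List Int)) : Prop := out = train_dev_data_alt dataset
instance (dataset : List (List Int)) (out : List (List Int) × List (List Int)) : Decidable (Spec_train_dev_data dataset out) := by unfold Spec_train_dev_data; infer_instance

-- ===== CLAIM (what is proved, stated in full; the proofs are below) =====
def Claim_equal_train_dev_data : Prop := ∀ (dataset : List (List Int)), Dom_train_dev_data dataset → Spec_train_dev_data dataset (train_dev_data dataset)

-- ===== LEMMAS AND PROOFS =====

-- every 10th element via a skip counter (proof-only middleman between the two dev computations)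
def chunk10aux : Nat → List (List Int) → List (List Int)
  | _, [] => []
  | 0, x :: xs => x :: chunk10aux 9 xs
  | n + 1, _ :: xs => chunk10aux n xs

theorem chunk10aux_drop (xs : List (List Int)) : ∀ (n : Nat), chunk10aux n xs = chunk10aux 0 (xs.drop n) := by
  induction xs with
  | nil => intro n; cases n <;> simp [chunk10aux]
  | cons x xs ih =>
    intro n
    cases n with
    | zero => simp
    | succ m => simp [chunk10aux, ih m]

-- A's loop over the enumerated list splits into the two filters
theorem loopA_eq (xs : List (List Int)) (s : Int) (t d : List (List Int)) :
    (PySem.List.enumerate xs s).foldl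
      (fun (acc : List (List Int) × List (List Int)) p =>
        if p.1 % 10 != 0 then (acc.1 ++ [p.2], acc.2) else (acc.1, acc.2 ++ [p.2]))
      (t, d)
    = (t ++ ((PySem.List.enumerate xs s).filter (fun p => p.1 % 10 != 0)).map (·.2),
       d ++ ((PySem.List.enumerate xs s).filter (fun p => p.1 % 10 == 0)).map (·.2)) := by
  induction xs generalizing s t d with
  | nil => simp [PySem.List.enumerate_nil]
  | cons x xs ih =>
    rw [PySem.List.enumerate_cons]
    simp only [List.foldl_cons, List.filter_cons]
    by_cases h : s % 10 = 0
    · have h1 : (s % 10 != 0) = false := by simp [h]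
      have h2 : (s % 10 == 0) = true := by simp [h]
      simp only [h1, h2, Bool.false_eq_true, if_false, if_true, ih, List.map_cons]
      simp
    · have h1 : (s % 10 != 0) = true := by simp [h]
      have h2 : (s % 10 == 0) = false := by simp [h]
      simp only [h1, h2, Bool.false_eq_true, if_false, if_true, ih, List.map_cons]
      simp

-- the (i % 10 == 0)-filter of the enumeration is the skip-counter walk
theorem filter_eq_chunk10 (xs : List (List Int)) : ∀ (s : Nat),
    ((PySem.List.enumerate xs (s : Int)).filter (fun p => p.1 % 10 == 0)).map (·.2)
    = chunk10aux ((10 - s % 10) % 10) xs := by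
  induction xs with
  | nil => intro s; cases h : (10 - s % 10) % 10 <;> simp [PySem.List.enumerate_nil, chunk10aux]
  | cons x xs ih =>
    intro s
    rw [PySem.List.enumerate_cons, List.filter_cons]
    have hcast : (s : Int) + 1 = ((s + 1 : Nat) : Int) := by push_cast; ring
    by_cases h : s % 10 = 0
    · have h2 : ((s : Int) % 10 == 0) = true := by
        simp only [beq_iff_eq]; omega
      have h0 : (10 - s % 10) % 10 = 0 := by omega
      have h1 : (10 - (s + 1) % 10) % 10 = 9 := by omega
      simp only [h2, if_true, List.map_cons, hcast, ih (s + 1), h0, h1, chunk10aux]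
    · have h2 : ((s : Int) % 10 == 0) = false := by
        simp only [beq_eq_false_iff_ne, ne_eq]; omega
      simp only [h2, Bool.false_eq_true, if_false, hcast, ih (s + 1)]
      rw [show (10 - s % 10) % 10 = ((10 - (s + 1) % 10) % 10) + 1 from by omega]
      simp [chunk10aux]

theorem filter_zero_eq_chunk10 (xs : List (List Int)) :
    ((PySem.List.enumerate xs 0).filter (fun p => p.1 % 10 == 0)).map (·.2) = chunk10aux 0 xs := by
  have h := filter_eq_chunk10 xs 0
  simpa using h

-- the stride-10 index walk is the skip-counter walk
theorem strided_eq_chunk10 : ∀ (n : Nat) (xs : List (List Int)), xs.length ≤ n →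
    List.filterMap (fun k => xs[10 * k]?) (List.range ((xs.length + 9) / 10))
    = chunk10aux 0 xs := by
  intro n
  induction n with
  | zero =>
    intro xs h
    have hx : xs = [] := by cases xs <;> simp_all
    subst hx
    simp [chunk10aux]
  | succ n ih =>
    intro xs h
    cases xs with
    | nil => simp [chunk10aux]
    | cons x xs =>
      have hcnt : ((x :: xs).length + 9) / 10 = ((xs.drop 9).length + 9) / 10 + 1 := by
        simp; omega
      rw [hcnt, List.range_succ_eq_map]
      simp only [List.filterMap_cons, List.filterMap_map, Nat.mul_zero, List.getElem?_cons_zero]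
      have hf : ((fun k => (x :: xs)[10 * k]?) ∘ fun k => k + 1)
          = fun k => (xs.drop 9)[10 * k]? := by
        funext k
        simp only [Function.comp_apply]
        rw [List.getElem?_drop, show 10 * (k + 1) = (9 + 10 * k) + 1 from by ring,
          List.getElem?_cons_succ]
      rw [hf, ih (xs.drop 9) (by simp at h ⊢; omega)]
      have hc : chunk10aux 0 (x :: xs) = x :: chunk10aux 0 (xs.drop 9) := by
        rw [show chunk10aux 0 (x :: xs) = x :: chunk10aux 9 xs from rfl, chunk10aux_drop]
      rw [hc]

-- unfolding B's slice: dataset[::10] is the stride-10 index walk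
theorem slice10_eq (xs : List (List Int)) :
    (PySem.List.slice? xs none none 10).getD []
    = List.filterMap (fun k => xs[10 * k]?) (List.range ((xs.length + 9) / 10)) := by
  simp only [PySem.List.slice?, PySem.List.sliceIndices]
  norm_num
  rw [show (if 0 < xs.length then (((xs.length : Int) + 10 - 1) / 10).toNat else 0)
      = (xs.length + 9) / 10 from by split <;> omega]
  apply List.filterMap_congr
  intro k _
  rw [show (10 * (k : Int)).toNat = 10 * k from by omega]

-- pyGetD at an enumerated index is the enumerated element
theorem pyGetD_of_mem_enumerate (xs : List (List Int)) (p : Int × List Int)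
    (hp : p ∈ PySem.List.enumerate xs 0) : PySem.List.pyGetD xs p.1 [] = p.2 := by
  rcases (PySem.List.mem_enumerate_iff xs 0 p).1 hp with ⟨k, hk, rfl⟩
  simp [PySem.List.pyGetD_natCast, hk]

-- ===== VERDICT (by name: the statement is the Claim_ definition above) =====
theorem train_dev_data_spec : Claim_equal_train_dev_data := by
  intro ds _
  unfold Spec_train_dev_data train_dev_data train_dev_data_alt
  have hrange : PySem.List.pyRange 0 (ds.length : Int) 1
      = (PySem.List.enumerate ds 0).map (·.1) := by
    rw [PySem.List.map_fst_enumerate]; norm_num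
  rw [hrange, List.foldl_map]
  have hbody : (PySem.List.enumerate ds 0).foldl
      (fun (acc : List (List Int) × List (List Int)) p =>
        if p.1 % 10 != 0 then (acc.1 ++ [PySem.List.pyGetD ds p.1 []], acc.2)
        else (acc.1, acc.2 ++ [PySem.List.pyGetD ds p.1 []])) ([], [])
      = (PySem.List.enumerate ds 0).foldl
      (fun (acc : List (List Int) × List (List Int)) p =>
        if p.1 % 10 != 0 then (acc.1 ++ [p.2], acc.2) else (acc.1, acc.2 ++ [p.2])) ([], []) := by
    apply PySem.List.foldl_congr_mem
    intro acc p hp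
    rw [pyGetD_of_mem_enumerate ds p hp]
  rw [hbody, loopA_eq]
  simp only [List.nil_append]
  rw [slice10_eq, strided_eq_chunk10 ds.length ds le_rfl, filter_zero_eq_chunk10]
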